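-- pv_equiv track=rewrite | github.com/HazimMohamed/InterviewPrep | CodeJam/2016/country_leader/country_leader.py | solve
-- ===== SOURCE A (Python) =====
-- def solve(list_names):
--     greatest_leaders = []
--     max_characters = 0
--     for name in list_names:
--         chars_in_name = len(list(filter(lambda a: a != ' ', set(list(name)))))
--         if chars_in_name > max_characters:
--             max_characters = chars_in_name
--             greatest_leaders = [name]
--         elif chars_in_name == max_characters:
--             greatest_leaders.append(name)
--     greatest_leaders.sort()
--     return greatest_leaders[0]
-- ===== SOURCE B (Python) =====
-- def solve(list_names):
--     best = max((len(set(n) - {' '}) for n in list_names), default=0)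
--     group = sorted(n for n in list_names if len(set(n) - {' '}) == best)
--     return group[0]
-- ===== Notes on version B (the rewrite author's own statement) =====
-- stated objective: simpler
-- what changed: Replaces A's single-pass running-max with tie-group maintenance by a two-phase compute-then-select: a max-reduction over distinct-non-space counts, then a filter-and-sort pass taking the first element.
import Mathlib
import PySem

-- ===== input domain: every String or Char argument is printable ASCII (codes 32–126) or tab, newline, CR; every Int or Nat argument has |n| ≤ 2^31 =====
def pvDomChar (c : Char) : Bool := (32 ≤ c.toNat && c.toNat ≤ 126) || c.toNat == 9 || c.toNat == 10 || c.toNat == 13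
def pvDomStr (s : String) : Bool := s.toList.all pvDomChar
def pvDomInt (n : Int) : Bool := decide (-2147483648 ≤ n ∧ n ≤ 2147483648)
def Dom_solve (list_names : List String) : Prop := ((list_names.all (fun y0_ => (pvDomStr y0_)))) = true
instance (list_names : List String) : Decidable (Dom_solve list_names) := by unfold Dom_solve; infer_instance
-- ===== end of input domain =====

-- B replaces A's single-pass running-max with tie-group maintenance by a two-phase
-- compute-then-select (max-reduction, then filter + sort + first element); objective: simpler.

-- ===== PORT A =====
-- len(list(filter(lambda a: a != ' ', set(list(name)))))
def pvCntA (s : String) : Nat :=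
  ((PySem.Set.ofList s.toList).filter (fun a => a ≠ ' ')).length

-- the loop body: update (greatest_leaders, max_characters) with one name
def pvStepA (st : List String × Nat) (name : String) : List String × Nat :=
  let chars_in_name := pvCntA name
  if chars_in_name > st.2 then ([name], chars_in_name)
  else if chars_in_name = st.2 then (st.1 ++ [name], st.2)
  else st

def solve (list_names : List String) : String :=
  let st := list_names.foldl pvStepA ([], 0)
  -- greatest_leaders.sort(); return greatest_leaders[0]  (indexing total here: Pre_solve
  -- excludes the empty list, the only input on which the Python raises IndexError)
  (PySem.List.sorted st.1 (fun x => x) false).headI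

-- ===== PORT B =====
-- len(set(n) - {' '})
def pvCntB (s : String) : Nat :=
  (PySem.Set.diff (PySem.Set.ofList s.toList) [' ']).length

-- max(..., default=0)
def pvMaxD0 (l : List Nat) : Nat :=
  match l with
  | [] => 0
  | c :: cs => cs.foldl max c

def solve_alt (list_names : List String) : String :=
  let best := pvMaxD0 (list_names.map pvCntB)
  let group := PySem.List.sorted (list_names.filter (fun n => pvCntB n = best)) (fun x => x) false
  group.headI

-- ===== PRECONDITION & SPEC =====
-- Pre_ excludes only the empty list, on which the Python A raises IndexError.
def Pre_solve (list_names : List String) : Prop := list_names ≠ []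
instance (list_names : List String) : Decidable (Pre_solve list_names) := by unfold Pre_solve; infer_instance
def pvWitness_solve : List String := (["a b", "cd"])

def Spec_solve (list_names : List String) (out : String) : Prop := out = solve_alt list_names
instance (list_names : List String) (out : String) : Decidable (Spec_solve list_names out) := by unfold Spec_solve; infer_instance

-- ===== CLAIM (what is proved, stated in full; the proofs are below) =====
def Claim_equal_solve : Prop := ∀ (list_names : List String), Dom_solve list_names → Pre_solve list_names → Spec_solve list_names (solve list_names)

-- ===== LEMMAS AND PROOFS =====

theorem cntB_eq_cntA (s : String) : pvCntB s = pvCntA s := by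
  simp [pvCntA, pvCntB, PySem.Set.diff]

-- running max over the counts of a prefix
def pvM (l : List String) : Nat := (l.map pvCntA).foldl max 0

theorem cnt_le_M {l : List String} {n : String} (h : n ∈ l) : pvCntA n ≤ pvM l :=
  (PySem.List.le_foldl_max (l.map pvCntA) 0).2 _ (List.mem_map_of_mem h)

-- loop invariant for A's fold: the state is (names of maximal count, the max count)
theorem foldA_eq (l : List String) :
    l.foldl pvStepA ([], 0) = (l.filter (fun n => pvCntA n = pvM l), pvM l) := by
  induction l using List.reverseRecOn with
  | nil => simp [pvM]
  | append_singleton t x ih =>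
    rw [List.foldl_append, ih]
    have hM : pvM (t ++ [x]) = max (pvM t) (pvCntA x) := by
      simp [pvM, List.foldl_append]
    by_cases hgt : pvCntA x > pvM t
    · have hMx : pvM (t ++ [x]) = pvCntA x := by omega
      have hfilter : t.filter (fun n => pvCntA n = pvCntA x) = [] := by
        rw [List.filter_eq_nil_iff]
        intro n hn
        have := cnt_le_M hn
        simp only [decide_eq_true_eq]
        omega
      simp [pvStepA, hgt, List.filter_append, hMx, hfilter]
    · have hMt : pvM (t ++ [x]) = pvM t := by omega
      by_cases heq : pvCntA x = pvM t
      · simp [pvStepA, heq, List.filter_append, hMt]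
      · have hle : pvCntA x ≤ pvM t := by omega
        simp [pvStepA, hle.not_gt, heq, List.filter_append, hMt]

theorem foldl_max_cnt (l : List String) (a : Nat) :
    (l.map pvCntB).foldl max a = (l.map pvCntA).foldl max a := by
  induction l generalizing a with
  | nil => rfl
  | cons y ys ih => simp [List.foldl_cons, cntB_eq_cntA, ih]

theorem maxD0_eq (l : List String) : pvMaxD0 (l.map pvCntB) = pvM l := by
  cases l with
  | nil => simp [pvMaxD0, pvM]
  | cons x xs =>
    simp only [List.map_cons, pvMaxD0, pvM, List.foldl_cons, Nat.zero_max]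
    rw [cntB_eq_cntA, foldl_max_cnt]

-- ===== VERDICT (by name: the statement is the Claim_ definition above) =====
theorem solve_spec : Claim_equal_solve := by
  intro l _ _
  unfold Spec_solve solve solve_alt
  simp only [foldA_eq, maxD0_eq, cntB_eq_cntA]
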